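-- pv_equiv track=rewrite | github.com/akiv228/Cosmoman | path_utils.py | split_path_into_segments
-- ===== SOURCE A (Python) =====
-- def split_path_into_segments(path):
--     segments = []
--     if len(path) < 2:
--         return segments
--
--     current_dir = get_direction(path[0], path[1])
--     current_segment = [path[0]]
--
--     for i in range(1, len(path)):
--         new_dir = get_direction(path[i - 1], path[i])
--         if new_dir == current_dir:
--             current_segment.append(path[i])
--         else:
--             segments.append(current_segment)
--             current_segment = [path[i - 1], path[i]]
--             current_dir = new_dir
--
--     segments.append(current_segment)
--     return segments
--
-- def get_direction(p1, p2):
--     dx = p2[1] - p1[1]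
--     dy = p2[0] - p1[0]
--     if dx == 1: return 'right'
--     if dx == -1: return 'left'
--     if dy == 1: return 'down'
--     if dy == -1: return 'up'
--     return None
-- ===== SOURCE B (Python) =====
-- def get_direction(p1, p2):
--     dx = p2[1] - p1[1]
--     dy = p2[0] - p1[0]
--     if dx == 1: return 'right'
--     if dx == -1: return 'left'
--     if dy == 1: return 'down'
--     if dy == -1: return 'up'
--     return None
--
-- def split_path_into_segments(path):
--     n = len(path)
--     if n < 2:
--         return []
--     dirs = [get_direction(path[i - 1], path[i]) for i in range(1, n)]
--     cuts = [0] + [j for j in range(1, n - 1) if dirs[j] != dirs[j - 1]] + [n - 1]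
--     return [path[cuts[t]:cuts[t + 1] + 1] for t in range(len(cuts) - 1)]
-- ===== Notes on version B (the rewrite author's own statement) =====
-- stated objective: alternative
-- what changed: A's single interleaved state-machine loop (running direction, growing current segment, flush on change) is replaced by two differently-shaped passes: build the per-edge direction table, collect the indices where consecutive directions differ, then emit each segment as a slice of the path between consecutive cut indices (adjacent segments share the turning point via the cut+1 slice bound).
import Mathlib
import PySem

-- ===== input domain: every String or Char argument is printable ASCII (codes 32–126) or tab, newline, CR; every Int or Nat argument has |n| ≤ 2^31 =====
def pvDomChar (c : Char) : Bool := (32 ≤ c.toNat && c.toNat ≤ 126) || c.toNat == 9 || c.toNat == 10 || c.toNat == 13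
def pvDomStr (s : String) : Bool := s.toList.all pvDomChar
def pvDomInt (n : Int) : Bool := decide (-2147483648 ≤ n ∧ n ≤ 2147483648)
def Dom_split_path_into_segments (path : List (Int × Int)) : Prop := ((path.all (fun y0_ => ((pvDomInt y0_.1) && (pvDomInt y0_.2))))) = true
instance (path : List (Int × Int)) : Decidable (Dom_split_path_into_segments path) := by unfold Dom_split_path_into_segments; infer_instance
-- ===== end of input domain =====

-- B replaces A's interleaved state-machine loop by two differently-shaped passes —
-- build the per-edge direction table, collect the change indices, then slice the path
-- between consecutive cuts (objective: alternative decomposition, same linear cost).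

-- ===== PORT A =====
def get_direction (p1 p2 : Int × Int) : Option String :=
  let dx := p2.2 - p1.2
  let dy := p2.1 - p1.1
  if dx = 1 then some "right"
  else if dx = -1 then some "left"
  else if dy = 1 then some "down"
  else if dy = -1 then some "up"
  else none

def split_path_into_segments (path : List (Int × Int)) : List (List (Int × Int)) :=
  let segments : List (List (Int × Int)) := []
  if path.length < 2 then segments
  else
    let current_dir := get_direction (PySem.List.pyGetD path 0 (0,0)) (PySem.List.pyGetD path 1 (0,0))
    let current_segment := [PySem.List.pyGetD path 0 (0,0)]
    let st := (PySem.List.pyRange 1 path.length 1).foldl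
      (fun (st : List (List (Int × Int)) × List (Int × Int) × Option String) i =>
        let new_dir := get_direction (PySem.List.pyGetD path (i-1) (0,0)) (PySem.List.pyGetD path i (0,0))
        if new_dir = st.2.2 then (st.1, st.2.1 ++ [PySem.List.pyGetD path i (0,0)], st.2.2)
        else (st.1 ++ [st.2.1], [PySem.List.pyGetD path (i-1) (0,0), PySem.List.pyGetD path i (0,0)], new_dir))
      (segments, current_segment, current_dir)
    st.1 ++ [st.2.1]

-- ===== PORT B =====
def split_path_into_segments_alt (path : List (Int × Int)) : List (List (Int × Int)) :=
  let n : Int := path.length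
  if n < 2 then []
  else
    let dirs := (PySem.List.pyRange 1 n 1).map
      (fun i => get_direction (PySem.List.pyGetD path (i-1) (0,0)) (PySem.List.pyGetD path i (0,0)))
    let cuts := [(0:Int)] ++
      (PySem.List.pyRange 1 (n-1) 1).filter
        (fun j => decide (PySem.List.pyGetD dirs j none ≠ PySem.List.pyGetD dirs (j-1) none)) ++ [n-1]
    (PySem.List.pyRange 0 ((cuts.length : Int) - 1) 1).map
      (fun t => PySem.List.slice path (some (PySem.List.pyGetD cuts t 0)) (some (PySem.List.pyGetD cuts (t+1) 0 + 1)))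

-- ===== PRECONDITION & SPEC =====
def Spec_split_path_into_segments (path : List (Int × Int)) (out : List (List (Int × Int))) : Prop := out = split_path_into_segments_alt path
instance (path : List (Int × Int)) (out : List (List (Int × Int))) : Decidable (Spec_split_path_into_segments path out) := by unfold Spec_split_path_into_segments; infer_instance

-- ===== CLAIM (what is proved, stated in full; the proofs are below) =====
def Claim_equal_split_path_into_segments : Prop := ∀ (path : List (Int × Int)), Dom_split_path_into_segments path → Spec_split_path_into_segments path (split_path_into_segments path)

-- ===== LEMMAS AND PROOFS =====

-- Structural mirror of A's state machine (proof-only helper).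
def grp : (Int × Int) → List (Int × Int) → Option String → List (Int × Int) → List (List (Int × Int))
  | _, cur, _, [] => [cur]
  | prev, cur, cdir, q :: qs =>
    if get_direction prev q = cdir then grp q (cur ++ [q]) cdir qs
    else cur :: grp q [prev, q] (get_direction prev q) qs

-- Directions of consecutive pairs (proof-only helper).
def dList : List (Int × Int) → List (Option String)
  | p :: q :: r => get_direction p q :: dList (q :: r)
  | _ => []

-- Change indices, walking the direction list (proof-only helper).
def chg : Nat → Option String → List (Option String) → List Int
  | _, _, [] => []
  | j, d, e :: es => if e ≠ d then (j : Int) :: chg (j+1) e es else chg (j+1) e es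

-- Map over adjacent pairs (proof-only helper).
def adjMap (g : Int → Int → List (Int × Int)) : List Int → List (List (Int × Int))
  | a :: b :: r => g a b :: adjMap g (b :: r)
  | _ => []

theorem dList_length (l : List (Int × Int)) : (dList l).length = l.length - 1 := by
  match l with
  | [] => rfl
  | [_] => rfl
  | p :: q :: r => simp [dList, dList_length (q :: r)]

theorem dList_getElem (l : List (Int × Int)) (k : Nat) (h : k + 1 < l.length) :
    (dList l)[k]'(by rw [dList_length]; omega) = get_direction (l[k]'(by omega)) (l[k+1]'h) := by
  match l, k with
  | p :: q :: r, 0 => rfl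
  | p :: q :: r, k + 1 =>
    have := dList_getElem (q :: r) k (by simpa using h)
    simpa [dList] using this

theorem adjMap_length (g : Int → Int → List (Int × Int)) (cs : List Int) :
    (adjMap g cs).length = cs.length - 1 := by
  match cs with
  | [] => rfl
  | [_] => rfl
  | a :: b :: r => simp [adjMap, adjMap_length g (b :: r)]

theorem adjMap_getElem (g : Int → Int → List (Int × Int)) (cs : List Int) (t : Nat)
    (h : t + 1 < cs.length) :
    (adjMap g cs)[t]'(by rw [adjMap_length]; omega) = g (cs[t]'(by omega)) (cs[t+1]'h) := by
  match cs, t with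
  | a :: b :: r, 0 => rfl
  | a :: b :: r, t + 1 =>
    have := adjMap_getElem g (b :: r) t (by simpa using h)
    simpa [adjMap] using this

theorem adjMap_cons₂ (g : Int → Int → List (Int × Int)) (a b : Int) (r : List Int) :
    adjMap g (a :: b :: r) = g a b :: adjMap g (b :: r) := rfl

-- conversion 1: the index-built direction table of B is dList
theorem dirs_eq (path : List (Int × Int)) :
    (PySem.List.pyRange 1 (path.length : Int) 1).map
      (fun i => get_direction (PySem.List.pyGetD path (i-1) (0,0)) (PySem.List.pyGetD path i (0,0)))
    = dList path := by
  apply List.ext_getElem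
  · simp [PySem.List.length_pyRange_one, dList_length]
  · intro k h1 h2
    rw [dList_length] at h2
    rw [List.getElem_map, PySem.List.getElem_pyRange_one]
    rw [dList_getElem path k (by omega)]
    have e1 : (1 : Int) + k - 1 = ((k : Nat) : Int) := by ring
    have e2 : (1 : Int) + k = ((k + 1 : Nat) : Int) := by push_cast; ring
    rw [e1, e2, PySem.List.pyGetD_natCast, PySem.List.pyGetD_natCast,
      List.getD_eq_getElem _ _ (by omega), List.getD_eq_getElem _ _ (by omega)]

-- conversion 2: the index-built slice list of B is adjMap over the cut list
theorem adjMap_eq (path : List (Int × Int)) (cs : List Int) :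
    (PySem.List.pyRange 0 ((cs.length : Int) - 1) 1).map
      (fun t => PySem.List.slice path (some (PySem.List.pyGetD cs t 0)) (some (PySem.List.pyGetD cs (t+1) 0 + 1)))
    = adjMap (fun a b => PySem.List.slice path (some a) (some (b+1))) cs := by
  apply List.ext_getElem
  · simp [PySem.List.length_pyRange_one, adjMap_length]
  · intro t h1 h2
    rw [adjMap_length] at h2
    rw [List.getElem_map, PySem.List.getElem_pyRange_one]
    rw [adjMap_getElem _ cs t (by omega)]
    have e2 : (0 : Int) + (t : Nat) + 1 = ((t + 1 : Nat) : Int) := by push_cast; ring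
    have e1 : (0 : Int) + (t : Nat) = ((t : Nat) : Int) := by ring
    rw [e2, e1, PySem.List.pyGetD_natCast, PySem.List.pyGetD_natCast,
      List.getD_eq_getElem _ _ (by omega), List.getD_eq_getElem _ _ (by omega)]

-- conversion 3: the filtered index range of B is chg
theorem chg_eq (ds : List (Option String)) :
    ∀ (m j : Nat), 1 ≤ j → j + m = ds.length →
    (PySem.List.pyRange (j : Int) (ds.length : Int) 1).filter
      (fun i => decide (PySem.List.pyGetD ds i none ≠ PySem.List.pyGetD ds (i-1) none))
    = chg j (ds.getD (j-1) none) (ds.drop j) := by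
  intro m
  induction m with
  | zero =>
    intro j h1 h2
    rw [PySem.List.pyRange_one_eq_nil (by omega)]
    rw [List.drop_of_length_le (by omega)]
    rfl
  | succ m ih =>
    intro j h1 h2
    rw [PySem.List.pyRange_one_cons (by exact_mod_cast by omega)]
    rw [List.filter_cons]
    have hj : j < ds.length := by omega
    have hd : ds.drop j = ds[j] :: ds.drop (j+1) := by
      rw [List.drop_eq_getElem_cons hj]
    have ej : ((j : Nat) : Int) - 1 = ((j - 1 : Nat) : Int) := by omega
    have egj : PySem.List.pyGetD ds ((j:Nat):Int) none = ds[j] := by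
      rw [PySem.List.pyGetD_natCast, List.getD_eq_getElem _ _ hj]
    have egj1 : PySem.List.pyGetD ds (((j:Nat):Int) - 1) none = ds[j-1]'(by omega) := by
      rw [ej, PySem.List.pyGetD_natCast, List.getD_eq_getElem _ _ (by omega)]
    have ejj : ((j : Nat) : Int) + 1 = ((j + 1 : Nat) : Int) := by push_cast; ring
    have ih' := ih (j+1) (by omega) (by omega)
    rw [ejj] at *
    rw [hd]
    show _ = chg j (ds.getD (j-1) none) (ds[j] :: ds.drop (j+1))
    rw [List.getD_eq_getElem _ _ (by omega)]
    simp only [egj, egj1, chg]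
    by_cases hne : ds[j] = ds[j-1]'(by omega)
    · rw [if_neg (by simp [hne]), if_neg (by simp [hne])]
      rw [ih']
      have e : j + 1 - 1 = j := by omega
      rw [e, List.getD_eq_getElem _ _ hj]
    · rw [if_pos (by simp [hne]), if_pos (by simp [hne])]
      rw [ih']
      have e : j + 1 - 1 = j := by omega
      rw [e, List.getD_eq_getElem _ _ hj]

-- A's fold over the index range equals the structural machine grp
theorem foldA (path : List (Int × Int)) :
    ∀ (m k : Nat) (segs : List (List (Int × Int))) (cur : List (Int × Int)) (cdir : Option String),
    k + m = path.length → k < path.length →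
    (let st := (PySem.List.pyRange ((k : Int) + 1) (path.length : Int) 1).foldl
      (fun (st : List (List (Int × Int)) × List (Int × Int) × Option String) i =>
        let new_dir := get_direction (PySem.List.pyGetD path (i-1) (0,0)) (PySem.List.pyGetD path i (0,0))
        if new_dir = st.2.2 then (st.1, st.2.1 ++ [PySem.List.pyGetD path i (0,0)], st.2.2)
        else (st.1 ++ [st.2.1], [PySem.List.pyGetD path (i-1) (0,0), PySem.List.pyGetD path i (0,0)], new_dir))
      (segs, cur, cdir)
     st.1 ++ [st.2.1])
    = segs ++ grp (PySem.List.pyGetD path (k : Int) (0,0)) cur cdir (path.drop (k+1)) := by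
  intro m
  induction m with
  | zero => intro k _ _ _ h1 h2; omega
  | succ m ih =>
    intro k segs cur cdir h1 h2
    by_cases hk : k + 1 < path.length
    · have ecast : ((k : Nat) : Int) + 1 = ((k + 1 : Nat) : Int) := by push_cast; ring
      rw [ecast, PySem.List.pyRange_one_cons (by exact_mod_cast hk)]
      rw [List.foldl_cons]
      have e0 : ((k + 1 : Nat) : Int) - 1 = ((k : Nat) : Int) := by push_cast; ring
      have gk : PySem.List.pyGetD path ((k:Nat):Int) (0,0) = path[k] := by
        rw [PySem.List.pyGetD_natCast, List.getD_eq_getElem _ _ h2]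
      have gk1 : PySem.List.pyGetD path (((k+1):Nat):Int) (0,0) = path[k+1] := by
        rw [PySem.List.pyGetD_natCast, List.getD_eq_getElem _ _ hk]
      have hd : path.drop (k+1) = path[k+1] :: path.drop (k+2) := by
        rw [List.drop_eq_getElem_cons hk]
      simp only [e0, gk, gk1]
      rw [hd]
      by_cases hdir : get_direction path[k] path[k+1] = cdir
      · rw [grp, if_pos hdir]
        simp only [hdir]
        have := ih (k+1) segs (cur ++ [path[k+1]]) cdir (by omega) (by omega)
        simp only [gk1] at this
        exact this
      · rw [grp, if_neg hdir]
        simp only [if_neg hdir]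
        have := ih (k+1) (segs ++ [cur]) [path[k], path[k+1]] (get_direction path[k] path[k+1]) (by omega) (by omega)
        simp only [gk1] at this
        rw [this, List.append_assoc]
        rfl
    · have hkl : path.length ≤ ((k:Nat):Int) + 1 := by exact_mod_cast by omega
      rw [PySem.List.pyRange_one_eq_nil (by exact_mod_cast hkl)]
      rw [List.drop_of_length_le (by omega)]
      rfl

-- the heart: grp produces exactly the slices between consecutive cut indices
theorem main_grp (path : List (Int × Int)) :
    ∀ (l : List (Int × Int)) (pos c : Nat) (prev : Int × Int) (cdir : Option String),
    c ≤ pos → path.drop pos = prev :: l →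
    grp prev ((path.drop c).take (pos + 1 - c)) cdir l
    = adjMap (fun a b => PySem.List.slice path (some a) (some (b+1)))
        ((c : Int) :: chg pos cdir (dList (prev :: l)) ++ [((path.length - 1 : Nat) : Int)]) := by
  intro l
  induction l with
  | nil =>
    intro pos c prev cdir hc hdrop
    have hlen : pos + 1 = path.length := by
      have := congrArg List.length hdrop
      simp at this
      omega
    simp only [dList, chg, grp]
    show _ = [PySem.List.slice path (some (c:Int)) (some (((path.length - 1 : Nat) : Int) + 1))]
    have e : ((path.length - 1 : Nat) : Int) + 1 = ((pos + 1 - c + c : Nat) : Int) := by omega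
    rw [e]
    have : PySem.List.slice path (some (c:Int)) (some ((( pos + 1 - c + c : Nat) : Int))) =
        (path.drop c).take (pos + 1 - c + c - c) := by
      exact_mod_cast PySem.List.slice_natCast path c (pos + 1 - c + c)
    simp only [Nat.add_sub_cancel] at this
    rw [this]
  | cons q qs ih =>
    intro pos c prev cdir hc hdrop
    have hpos1 : pos + 1 < path.length := by
      have := congrArg List.length hdrop
      simp at this
      omega
    have hdrop1 : path.drop (pos + 1) = q :: qs := by
      have : path.drop (pos + 1) = (path.drop pos).drop 1 := by
        rw [List.drop_drop]
      rw [this, hdrop]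
      rfl
    have hq : path[pos+1]'hpos1 = q := by
      have h0 : (path.drop (pos+1))[0]'(by rw [hdrop1]; simp) = q := by
        simp [hdrop1]
      simpa using h0
    have hcur : ∀ c' : Nat, c' ≤ pos → (path.drop c').take (pos + 1 - c') ++ [q] = (path.drop c').take (pos + 2 - c') := by
      intro c' hc'
      have e : pos + 2 - c' = (pos + 1 - c') + 1 := by omega
      rw [e, List.take_add_one]
      congr 1
      have hlt : pos + 1 - c' < (path.drop c').length := by
        simp [List.length_drop]; omega
      rw [List.getElem?_eq_getElem hlt]
      simp only [List.getElem_drop]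
      have e2 : c' + (pos + 1 - c') = pos + 1 := by omega
      simp [e2, hq]
    have hdL : dList (prev :: q :: qs) = get_direction prev q :: dList (q :: qs) := rfl
    rw [hdL]
    by_cases hdir : get_direction prev q = cdir
    · rw [grp, if_pos hdir]
      show grp q ((path.drop c).take (pos + 1 - c) ++ [q]) cdir qs = _
      rw [hcur c hc]
      have e : pos + 2 - c = pos + 1 + 1 - c := by omega
      rw [e]
      rw [ih (pos+1) c q cdir (by omega) hdrop1]
      rw [chg, if_neg (by simp [hdir])]
      rw [hdir]
    · rw [grp, if_neg hdir]
      rw [chg, if_pos (by simp [hdir])]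
      have hpq : [prev, q] = (path.drop pos).take (pos + 1 + 1 - pos) := by
        have e2 : pos + 1 + 1 - pos = 2 := by omega
        rw [e2, hdrop]
        rfl
      rw [hpq, ih (pos+1) pos q (get_direction prev q) (by omega) hdrop1]
      show _ = adjMap _ ((c:Int) :: ((pos:Nat):Int) :: (chg (pos+1) (get_direction prev q) (dList (q :: qs)) ++ [((path.length - 1 : Nat) : Int)]))
      rw [adjMap_cons₂]
      congr 1
      have : PySem.List.slice path (some (c:Int)) (some (((pos : Nat):Int) + 1)) =
          (path.drop c).take (pos + 1 - c) := by
        have e : ((pos : Nat):Int) + 1 = ((pos + 1 : Nat) : Int) := by push_cast; ring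
        rw [e]
        exact_mod_cast PySem.List.slice_natCast path c (pos + 1)
      show _ = PySem.List.slice path (some (c:Int)) (some (((pos:Nat):Int) + 1))
      exact this.symm

-- ===== VERDICT (by name: the statement is the Claim_ definition above) =====
theorem split_path_into_segments_spec : Claim_equal_split_path_into_segments := by
  intro path _
  unfold Spec_split_path_into_segments
  match path with
  | [] => rfl
  | [p] => rfl
  | p :: q :: r =>
    have hA : split_path_into_segments (p :: q :: r) = grp p [p] (get_direction p q) (q :: r) := by
      have h := foldA (p :: q :: r) (p :: q :: r).length 0 [] [p] (get_direction p q) (by simp) (by simp)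
      rw [show (((0:Nat)):Int) + 1 = (1:Int) from by norm_num] at h
      rw [PySem.List.pyGetD_natCast] at h
      simp only [List.getD_cons_zero, List.nil_append, List.drop_succ_cons, List.drop_zero] at h
      simp only [split_path_into_segments]
      rw [if_neg (by simp)]
      rw [PySem.List.pyGetD_zero_cons,
        show PySem.List.pyGetD (p :: q :: r) 1 (0,0) = q from by
          rw [show (1:Int) = ((1:Nat):Int) from rfl, PySem.List.pyGetD_natCast]
          simp]
      exact h
    have e : ((p :: q :: r).length : Int) - 1 = (((dList (p :: q :: r)).length : Nat) : Int) := by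
      rw [dList_length]
      simp only [List.length_cons]
      push_cast
      omega
    have hc := chg_eq (dList (p :: q :: r)) ((dList (p :: q :: r)).length - 1) 1 (le_refl 1)
      (by rw [dList_length]; simp only [List.length_cons]; omega)
    rw [show ((1:Nat):Int) = (1:Int) from rfl] at hc
    have hB : split_path_into_segments_alt (p :: q :: r)
        = adjMap (fun a b => PySem.List.slice (p :: q :: r) (some a) (some (b+1)))
            ((0 : Int) :: chg 0 (get_direction p q) (dList (p :: q :: r)) ++ [(((p :: q :: r).length - 1 : Nat) : Int)]) := by
      simp only [split_path_into_segments_alt]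
      rw [if_neg (by simp)]
      rw [dirs_eq (p :: q :: r), e, hc, adjMap_eq]
      show adjMap _ ((0:Int) :: (chg 1 ((dList (p :: q :: r)).getD 0 none) ((dList (p :: q :: r)).drop 1) ++ [(((dList (p :: q :: r)).length : Nat) : Int)])) = _
      rw [show chg 0 (get_direction p q) (dList (p :: q :: r)) = chg 1 (get_direction p q) (dList (q :: r)) from by rw [show dList (p :: q :: r) = get_direction p q :: dList (q :: r) from rfl, chg, if_neg (by simp)]]
      rw [dList_length]
      rfl
    rw [hA, hB]
    exact main_grp (p :: q :: r) (q :: r) 0 0 p (get_direction p q) (le_refl 0) rfl
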